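-- pv_equiv track=rewrite | github.com/ArikBartzadok/beecrowd-challenges | Python/1024.py | analisar_entrada
-- ===== SOURCE A (Python) =====
-- def array_comprimido(a):
--     return ''.join(map(str, a))
--
-- def inverter_array(a):
--     return a[::-1]
--
-- def formatacao_indice(l, i):
--     return (l[i].isupper() or l[i].islower())
--
-- def tamanho_minimo(i, e):
--     return i >= (len(e)//2)
--
-- def obter_unicode(l, i, n):
--     return chr(ord(l[i]) + n) if (n == 3) else chr(ord(l[i]) - n)
--
-- def analisar_entrada(e):
--     l = list(e)
--
--     for i in range(len(e)):
--         if formatacao_indice(l, i): l[i] = obter_unicode(l, i, 3)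
--
--     l = inverter_array(l)
--
--     for i in range(len(e)):
--         if tamanho_minimo(i, e): l[i] = obter_unicode(l, i, 1)
--
--     return array_comprimido(l)
-- ===== SOURCE B (Python) =====
-- def analisar_entrada(e):
--     n = len(e)
--     h = n // 2
--     out = []
--     for i in range(n):
--         c = e[n - 1 - i]
--         k = ord(c)
--         if c.isupper() or c.islower():
--             k += 3
--         if i >= h:
--             k -= 1
--         out.append(chr(k))
--     return ''.join(out)
-- ===== Notes on version B (the rewrite author's own statement) =====
-- stated objective: simpler
-- what changed: Replaced A's three passes (shift cased chars, reverse the list, decrement the second half) by one forward loop over output indices that reads the source char from the end (e[n-1-i]) and applies both the +3 cased shift and the second-half -1 directly.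
import Mathlib
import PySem

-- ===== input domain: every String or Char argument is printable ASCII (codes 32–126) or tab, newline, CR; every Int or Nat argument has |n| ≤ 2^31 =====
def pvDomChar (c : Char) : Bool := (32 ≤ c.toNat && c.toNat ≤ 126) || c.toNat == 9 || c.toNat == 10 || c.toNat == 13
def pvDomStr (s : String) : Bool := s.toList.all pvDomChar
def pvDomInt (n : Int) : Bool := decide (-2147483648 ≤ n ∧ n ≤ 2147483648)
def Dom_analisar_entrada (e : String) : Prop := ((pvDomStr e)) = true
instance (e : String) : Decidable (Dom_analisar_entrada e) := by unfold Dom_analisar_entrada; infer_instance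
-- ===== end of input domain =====

-- B folds A's three passes (cased +3 shift, reversal, second-half -1) into one
-- forward loop over output indices that reads the source from the end (objective: simpler).

-- ===== PORT A =====
-- helper formatacao_indice(l, i): l[i].isupper() or l[i].islower(), at char level
def pvFormatacao (c : Char) : Bool := PySem.Chars.isupper c || PySem.Chars.islower c

-- helper obter_unicode(l, i, n): chr(ord(l[i]) + n) if n == 3 else chr(ord(l[i]) - n), at char level
def pvObterUnicode (c : Char) (n : Nat) : Char :=
  if n == 3 then Char.ofNat (c.toNat + n) else Char.ofNat (c.toNat - n)

def analisar_entrada (e : String) : String :=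
  let l := e.toList
  -- first loop: l[i] = obter_unicode(l, i, 3) when formatacao_indice(l, i)
  let l1 := l.map (fun c => if pvFormatacao c then pvObterUnicode c 3 else c)
  -- inverter_array
  let l2 := l1.reverse
  -- second loop: l[i] = obter_unicode(l, i, 1) when i >= len(e)//2 (tamanho_minimo)
  let l3 := l2.mapIdx (fun i c => if l.length / 2 ≤ i then pvObterUnicode c 1 else c)
  String.ofList l3

-- ===== PORT B =====
def analisar_entrada_alt (e : String) : String :=
  let l := e.toList
  let n := l.length
  let h := n / 2
  String.ofList <| (List.range n).map fun i =>
    let c := l.getD (n - 1 - i) ' '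
    let k := c.toNat
    let k := if PySem.Chars.isupper c || PySem.Chars.islower c then k + 3 else k
    let k := if h ≤ i then k - 1 else k
    Char.ofNat k

-- ===== PRECONDITION & SPEC =====
def Spec_analisar_entrada (e : String) (out : String) : Prop := out = analisar_entrada_alt e
instance (e : String) (out : String) : Decidable (Spec_analisar_entrada e out) := by unfold Spec_analisar_entrada; infer_instance

-- ===== CLAIM (what is proved, stated in full; the proofs are below) =====
def Claim_equal_analisar_entrada : Prop := ∀ (e : String), Dom_analisar_entrada e → Spec_analisar_entrada e (analisar_entrada e)

-- ===== LEMMAS AND PROOFS =====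

-- toNat of ofNat on a valid (< 0xD800) scalar value
theorem pv_toNat_ofNat (n : Nat) (h : n < 55296) : (Char.ofNat n).toNat = n := by
  simp [Char.ofNat, Char.ofNatAux, Nat.isValidChar, h, Char.toNat]

-- Core list-level equality of the two computations (on ASCII-domain chars).
theorem pv_lists_eq (l : List Char) (hdom : ∀ c ∈ l, pvDomChar c = true) :
    (((l.map (fun c => if pvFormatacao c then pvObterUnicode c 3 else c)).reverse).mapIdx
        (fun i c => if l.length / 2 ≤ i then pvObterUnicode c 1 else c))
      = (List.range l.length).map (fun i =>
          let c := l.getD (l.length - 1 - i) ' '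
          let k := c.toNat
          let k := if PySem.Chars.isupper c || PySem.Chars.islower c then k + 3 else k
          let k := if l.length / 2 ≤ i then k - 1 else k
          Char.ofNat k) := by
  apply List.ext_getElem
  · simp
  · intro i h1 h2
    simp only [List.getElem_mapIdx] at *
    have hi : i < l.length := by simpa using h1
    have hlt : l.length - 1 - i < l.length := by omega
    rw [List.getElem_reverse, List.getElem_map, List.getElem_map, List.getElem_range,
        List.getD_eq_getElem l ' ' (by simpa using hlt)]
    simp only [List.length_map]
    set c := l[l.length - 1 - i] with hc_def
    have hcd : pvDomChar c = true := hdom c (by rw [hc_def]; exact List.getElem_mem hlt)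
    have hle : c.toNat ≤ 126 := by
      simp only [pvDomChar, Bool.or_eq_true, Bool.and_eq_true, decide_eq_true_eq, beq_iff_eq] at hcd
      omega
    simp only [pvFormatacao, pvObterUnicode, beq_self_eq_true, if_true, Nat.reduceBEq]
    by_cases hcase : (PySem.Chars.isupper c || PySem.Chars.islower c) = true
    · by_cases hhalf : l.length / 2 ≤ i
      · simp [hcase, hhalf, pv_toNat_ofNat (c.toNat + 3) (by omega)]
      · simp [hcase, hhalf]
    · by_cases hhalf : l.length / 2 ≤ i
      · simp [hcase, hhalf]
      · simp only [hcase, hhalf, if_false]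
        exact (Char.ofNat_toNat c).symm

-- ===== VERDICT (by name: the statement is the Claim_ definition above) =====
theorem analisar_entrada_spec : Claim_equal_analisar_entrada := by
  intro e hdom
  unfold Spec_analisar_entrada analisar_entrada analisar_entrada_alt
  refine congrArg String.ofList (pv_lists_eq e.toList ?_)
  intro c hc
  exact List.all_eq_true.mp hdom c hc
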